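-- pv_equiv track=rewrite | github.com/farhan0581/gfgcodes | newpractise/dp/max_path_sum.py | solve
-- ===== SOURCE A (Python) =====
-- def solve(arr, i, j, dp):
--     if i == len(arr)-1:
--         return arr[i][j]
--
--     if dp[i][j] != -1:
--         return dp[i][j]
--
--     m1=m2=m3=-999999999
--
--     if i+1 < len(arr):
--         m1 = arr[i][j] + solve(arr,i+1,j,dp)
--
--         if j+1 < len(arr[0]):
--             m2 = arr[i][j] + solve(arr,i+1,j+1,dp)
--
--         if j-1 >= 0:
--             m3 = arr[i][j] + solve(arr,i+1,j-1,dp)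
--
--
--     dp[i][j] = max(m1,m2,m3)
--     return dp[i][j]
-- ===== SOURCE B (Python) =====
-- def solve(arr, i, j, dp):
--     # Bottom-up tabulation (row by row from the last row upwards) instead of
--     # memoized top-down recursion.  Unlike A it does NOT mutate dp; the
--     # equivalence claimed is about the return value only.
--     last = len(arr) - 1
--     if i == last:
--         return arr[i][j]
--     if dp[i][j] != -1:
--         return dp[i][j]
--     S = -999999999
--     n = len(arr[0])
--     below = arr[last][:]
--     for r in range(last - 1, i - 1, -1):
--         cur = []
--         for c in range(n):
--             if dp[r][c] != -1:
--                 cur.append(dp[r][c])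
--             else:
--                 m1 = arr[r][c] + below[c]
--                 m2 = arr[r][c] + below[c + 1] if c + 1 < n else S
--                 m3 = arr[r][c] + below[c - 1] if c >= 1 else S
--                 cur.append(max(m1, m2, m3))
--         below = cur
--     return below[j]
-- ===== Notes on version B (the rewrite author's own statement) =====
-- stated objective: alternative
-- what changed: Replaces A's memoized top-down recursion that mutates dp with a pure bottom-up row-by-row tabulation from the last row up to row i (keeping the base-row and memo-read fast paths and the -999999999 sentinel semantics); B does not mutate dp (return-value equivalence only).
-- outside the precondition, e.g. on solve([[5], [1, 2]], 0, 0, [[-1], [-1, -1]]): A returns 6, B returns 6; on solve([[1, 2], [3, 4]], 0, -1, [[-1, -1], [-1, -1]]): A returns 6, B returns 6; on solve([[5], [3, 9]], 2, 1, [[6, 2], [2, 5, 2], [-3, -1, 3], [4]]): A returns -999999999, B returns 9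
import Mathlib
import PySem

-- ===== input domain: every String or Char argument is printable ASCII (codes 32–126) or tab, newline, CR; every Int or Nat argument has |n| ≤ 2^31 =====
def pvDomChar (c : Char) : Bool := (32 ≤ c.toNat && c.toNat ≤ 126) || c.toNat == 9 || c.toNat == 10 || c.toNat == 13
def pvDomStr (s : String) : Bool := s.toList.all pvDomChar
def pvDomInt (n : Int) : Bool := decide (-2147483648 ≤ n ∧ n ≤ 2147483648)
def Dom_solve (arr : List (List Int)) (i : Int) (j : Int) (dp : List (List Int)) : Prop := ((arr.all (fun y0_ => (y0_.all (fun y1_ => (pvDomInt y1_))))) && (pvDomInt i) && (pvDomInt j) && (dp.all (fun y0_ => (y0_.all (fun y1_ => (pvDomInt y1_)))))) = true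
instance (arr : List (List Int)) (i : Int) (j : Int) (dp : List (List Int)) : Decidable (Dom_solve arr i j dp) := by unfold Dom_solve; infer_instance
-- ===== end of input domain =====

-- B replaces A's memoized top-down recursion (which mutates dp) by a pure bottom-up
-- row-by-row tabulation; A mutates dp in place, B does not — the equivalence proved
-- here is about the RETURN value only.

-- ===== PORT A =====
-- xss[x][y] for indices in range (Pre_); exact there, 0 only where Python would raise
def pvGet2 (xss : List (List Int)) (x y : Int) : Int :=
  ((PySem.List.pyGet? xss x).bind (fun r => PySem.List.pyGet? r y)).getD 0

-- xss[x][y] = v for 0 ≤ x, y in range (Pre_); exact there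
def pvSet2 (xss : List (List Int)) (x y : Int) (v : Int) : List (List Int) :=
  xss.set x.toNat ((xss.getD x.toNat []).set y.toNat v)

-- A's recursion, threading the mutable dp as state; returns (value, final dp)
def solveA (arr : List (List Int)) (i : Int) (j : Int) (dp : List (List Int)) :
    Int × List (List Int) :=
  if i = (arr.length : Int) - 1 then (pvGet2 arr i j, dp)
  else if pvGet2 dp i j ≠ -1 then (pvGet2 dp i j, dp)
  else if h : i + 1 < (arr.length : Int) then
    let p1 := solveA arr (i + 1) j dp
    let m1 := pvGet2 arr i j + p1.1
    let p2 :=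
      if j + 1 < ((arr.headD []).length : Int) then
        let q := solveA arr (i + 1) (j + 1) p1.2
        (pvGet2 arr i j + q.1, q.2)
      else ((-999999999 : Int), p1.2)
    let p3 :=
      if j - 1 ≥ 0 then
        let q := solveA arr (i + 1) (j - 1) p2.2
        (pvGet2 arr i j + q.1, q.2)
      else ((-999999999 : Int), p2.2)
    let r := max (max m1 p2.1) p3.1
    (r, pvSet2 p3.2 i j r)
  else
    let r := max (max (-999999999 : Int) (-999999999)) (-999999999)
    (r, pvSet2 dp i j r)
termination_by (arr.length - i).toNat
decreasing_by all_goals omega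

def solve (arr : List (List Int)) (i : Int) (j : Int) (dp : List (List Int)) : Int :=
  (solveA arr i j dp).1

-- ===== PORT B =====
def solve_alt (arr : List (List Int)) (i : Int) (j : Int) (dp : List (List Int)) : Int :=
  let last : Int := (arr.length : Int) - 1
  if i = last then pvGet2 arr i j
  else if pvGet2 dp i j ≠ -1 then pvGet2 dp i j
  else
    let n : Int := ((arr.headD []).length : Int)
    let below0 := (PySem.List.pyGet? arr last).getD []
    let below :=
      (PySem.List.pyRange (last - 1) (i - 1) (-1)).foldl (fun below r =>
        (PySem.List.pyRange 0 n 1).map (fun c =>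
          let dv := pvGet2 dp r c
          if dv ≠ -1 then dv
          else
            let a := pvGet2 arr r c
            let m1 := a + PySem.List.pyGetD below c 0
            let m2 := if c + 1 < n then a + PySem.List.pyGetD below (c + 1) 0
                      else (-999999999 : Int)
            let m3 := if c ≥ 1 then a + PySem.List.pyGetD below (c - 1) 0
                      else (-999999999 : Int)
            max (max m1 m2) m3)) below0
    PySem.List.pyGetD below j 0

-- ===== PRECONDITION & SPEC =====
-- Pre_ = the inputs on which A returns: the base row i = len(arr)-1 with j a
-- valid (possibly negative) index into it, a memo hit dp[i][j] != -1 (both return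
-- dp[i][j] unrecursively), or a nonempty rectangular grid with dp of
-- the same shape and (i, j) a cell of it.  Excluded are ragged grids / out-of-range
-- or negative (i, j) in the recursive case, where A can raise IndexError (and B's
-- bottom-up fill needs the full rectangle, so it may raise where A happens to return).
def Pre_solve (arr : List (List Int)) (i : Int) (j : Int) (dp : List (List Int)) : Prop :=
  (arr ≠ [] ∧ i = (arr.length : Int) - 1 ∧ PySem.Raise.InRange (arr.getLastD []).length j) ∨
  (i ≠ (arr.length : Int) - 1 ∧
    ((PySem.List.pyGet? dp i).bind (fun r => PySem.List.pyGet? r j)).getD (-1) ≠ -1) ∨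
  ((∀ r ∈ arr, r.length = (arr.headD []).length) ∧
   dp.length = arr.length ∧
   (∀ r ∈ dp, r.length = (arr.headD []).length) ∧
   0 ≤ i ∧ i < (arr.length : Int) ∧ 0 ≤ j ∧ j < ((arr.headD []).length : Int))
instance (arr : List (List Int)) (i : Int) (j : Int) (dp : List (List Int)) : Decidable (Pre_solve arr i j dp) := by unfold Pre_solve; infer_instance

def pvWitness_solve : List (List Int) × Int × Int × List (List Int) :=
  ([[1, 2], [3, 4]], 0, 0, [[-1, -1], [-1, -1]])

def Spec_solve (arr : List (List Int)) (i : Int) (j : Int) (dp : List (List Int)) (out : Int) : Prop := out = solve_alt arr i j dp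
instance (arr : List (List Int)) (i : Int) (j : Int) (dp : List (List Int)) (out : Int) : Decidable (Spec_solve arr i j dp out) := by unfold Spec_solve; infer_instance

-- ===== CLAIM (what is proved, stated in full; the proofs are below) =====
def Claim_equal_solve : Prop := ∀ (arr : List (List Int)) (i : Int) (j : Int) (dp : List (List Int)), Dom_solve arr i j dp → Pre_solve arr i j dp → Spec_solve arr i j dp (solve arr i j dp)

-- ===== LEMMAS AND PROOFS =====

-- pure value function: what A returns, computed against the ORIGINAL dp
def fval (arr dp : List (List Int)) (i j : Int) : Int :=
  if i = (arr.length : Int) - 1 then pvGet2 arr i j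
  else if pvGet2 dp i j ≠ -1 then pvGet2 dp i j
  else if h : i + 1 < (arr.length : Int) then
    let a := pvGet2 arr i j
    let m1 := a + fval arr dp (i + 1) j
    let m2 := if j + 1 < ((arr.headD []).length : Int) then a + fval arr dp (i + 1) (j + 1)
              else (-999999999 : Int)
    let m3 := if j - 1 ≥ 0 then a + fval arr dp (i + 1) (j - 1)
              else (-999999999 : Int)
    max (max m1 m2) m3
  else (-999999999 : Int)
termination_by (arr.length - i).toNat
decreasing_by all_goals omega

theorem pvGet2_nonneg (xss : List (List Int)) (x y : Int) (hx : 0 ≤ x) (hy : 0 ≤ y) :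
    pvGet2 xss x y = (xss.getD x.toNat []).getD y.toNat 0 := by
  unfold pvGet2
  rw [PySem.List.pyGet?_of_nonneg _ hx]
  rcases Nat.lt_or_ge x.toNat xss.length with h | h
  · rw [List.getElem?_eq_getElem h, List.getD_eq_getElem _ _ h]
    simp [PySem.List.pyGet?_of_nonneg _ hy, List.getD_eq_getElem?_getD]
  · rw [List.getElem?_eq_none_iff.mpr h, List.getD_eq_default _ _ h]
    simp

theorem length_pvSet2 (xss : List (List Int)) (x y v : Int) :
    (pvSet2 xss x y v).length = xss.length := by
  simp [pvSet2]

theorem rowlen_pvSet2 (xss : List (List Int)) (x y v : Int) (k : Nat) :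
    ((pvSet2 xss x y v).getD k []).length = ((xss.getD k []).length) := by
  unfold pvSet2
  rw [List.getD_eq_getElem?_getD, List.getD_eq_getElem?_getD, List.getElem?_set]
  by_cases hk : x.toNat = k
  · subst hk
    by_cases hl : x.toNat < xss.length
    · simp [hl, List.getD_eq_getElem?_getD]
    · simp [hl, List.getD_eq_getElem?_getD]
  · simp [hk]

theorem getD_pvSet2 (xss : List (List Int)) (x y v : Int) (a b : Nat)
    (hxl : x.toNat < xss.length) :
    ((pvSet2 xss x y v).getD a []).getD b 0 =
      if a = x.toNat ∧ b = y.toNat then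
        if y.toNat < (xss.getD x.toNat []).length then v else (xss.getD a []).getD b 0
      else (xss.getD a []).getD b 0 := by
  unfold pvSet2
  simp only [List.getD_eq_getElem?_getD, List.getElem?_set]
  by_cases ha : x.toNat = a
  · rw [if_pos ha, if_pos hxl]
    rw [← ha]
    simp only [Option.getD_some, List.getElem?_set]
    by_cases hb : y.toNat = b
    · rw [if_pos hb, ← hb]
      split
      · simp
      · next h =>
          rw [List.getElem?_eq_none_iff.mpr (Nat.le_of_not_lt h)]
          simp
    · rw [if_neg hb, if_neg (by exact fun hc => hb hc.2.symm)]
  · rw [if_neg ha, if_neg (by exact fun hc => ha hc.1.symm)]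

-- loop/memo invariant: every dp' cell is either untouched or holds its fval
def pvInv (arr dp dp' : List (List Int)) : Prop :=
  dp'.length = dp.length ∧
  (∀ k : Nat, (dp'.getD k []).length = (dp.getD k []).length) ∧
  (∀ x y : Nat, (x : Int) < (arr.length : Int) → (y : Int) < ((arr.headD []).length : Int) →
    ((dp'.getD x []).getD y 0 = (dp.getD x []).getD y 0 ∨
     ((dp.getD x []).getD y 0 = -1 ∧ (dp'.getD x []).getD y 0 = fval arr dp (x : Int) (y : Int))))

theorem pvInv_set (arr dp X : List (List Int))
    (hdplen : dp.length = arr.length)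
    (hdprow : ∀ r ∈ dp, r.length = (arr.headD []).length)
    (i j : Int) (hi0 : 0 ≤ i) (hilt : i < (arr.length : Int))
    (hj0 : 0 ≤ j) (_hjlt : j < ((arr.headD []).length : Int))
    (hXI : pvInv arr dp X)
    (hd : (dp.getD i.toNat []).getD j.toNat 0 = -1)
    (v : Int) (hv : v = fval arr dp i j) :
    pvInv arr dp (pvSet2 X i j v) := by
  obtain ⟨hlen, hrow, hcell⟩ := hXI
  have hiN : i.toNat < X.length := by omega
  have hdrow : (dp.getD i.toNat []).length = (arr.headD []).length := by
    rw [List.getD_eq_getElem _ _ (show i.toNat < dp.length by omega)]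
    exact hdprow _ (List.getElem_mem _)
  refine ⟨by rw [length_pvSet2]; exact hlen, fun k => by rw [rowlen_pvSet2]; exact hrow k, ?_⟩
  intro x y hx hy
  rw [getD_pvSet2 _ _ _ _ _ _ hiN]
  by_cases hxy : x = i.toNat ∧ y = j.toNat
  · rw [if_pos hxy, if_pos (show j.toNat < (X.getD i.toNat []).length by
      rw [hrow i.toNat, hdrow]; omega)]
    right
    obtain ⟨hx1, hy1⟩ := hxy
    subst hx1; subst hy1
    refine ⟨hd, ?_⟩
    rw [hv, Int.toNat_of_nonneg hi0, Int.toNat_of_nonneg hj0]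
  · rw [if_neg hxy]
    exact hcell x y hx hy

theorem solveA_eq (arr dp : List (List Int))
    (hdplen : dp.length = arr.length)
    (hdprow : ∀ r ∈ dp, r.length = (arr.headD []).length) :
    ∀ (k : Nat) (i j : Int) (dp' : List (List Int)),
      ((arr.length : Int) - i).toNat ≤ k →
      0 ≤ i → i < (arr.length : Int) → 0 ≤ j → j < ((arr.headD []).length : Int) →
      pvInv arr dp dp' →
      (solveA arr i j dp').1 = fval arr dp i j ∧ pvInv arr dp (solveA arr i j dp').2 := by
  intro k
  induction k with
  | zero =>
    intro i j dp' hk hi0 hilt hj0 hjlt hInv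
    exact absurd hk (by omega)
  | succ k ih =>
    intro i j dp' hk hi0 hilt hj0 hjlt hInv
    obtain ⟨hlen, hrowlen, hcell⟩ := hInv
    have hiN : ((i.toNat : Int)) = i := Int.toNat_of_nonneg hi0
    have hjN : ((j.toNat : Int)) = j := Int.toNat_of_nonneg hj0
    have hg' : pvGet2 dp' i j = (dp'.getD i.toNat []).getD j.toNat 0 :=
      pvGet2_nonneg _ _ _ hi0 hj0
    have hgd : pvGet2 dp i j = (dp.getD i.toNat []).getD j.toNat 0 :=
      pvGet2_nonneg _ _ _ hi0 hj0
    by_cases hbase : i = (arr.length : Int) - 1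
    · rw [solveA, if_pos hbase]
      exact ⟨by rw [fval, if_pos hbase], hlen, hrowlen, hcell⟩
    · have hmemo := hcell i.toNat j.toNat (by rw [hiN]; omega) (by rw [hjN]; omega)
      rw [hiN, hjN] at hmemo
      by_cases hmem : pvGet2 dp' i j ≠ -1
      · rw [solveA, if_neg hbase, if_pos hmem]
        refine ⟨?_, hlen, hrowlen, hcell⟩
        rcases hmemo with he | ⟨_, hdf⟩
        · have hEq : pvGet2 dp i j = pvGet2 dp' i j := by rw [hgd, hg', he]
          rw [fval, if_neg hbase, if_pos (show pvGet2 dp i j ≠ -1 by rw [hEq]; exact hmem)]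
          exact hEq.symm
        · rw [hg', hdf]
      · rw [not_not] at hmem
        have hdpmem : (dp.getD i.toNat []).getD j.toNat 0 = -1 := by
          rcases hmemo with he | ⟨hd1, _⟩
          · rw [← he, ← hg', hmem]
          · exact hd1
        have hdpmem' : pvGet2 dp i j = -1 := by rw [hgd]; exact hdpmem
        have hi1 : i + 1 < (arr.length : Int) := by omega
        rw [solveA, if_neg hbase, if_neg (by simp [hmem]), dif_pos hi1]
        obtain ⟨h1v, h1I⟩ := ih (i + 1) j dp' (by omega) (by omega) hi1 hj0 hjlt
          ⟨hlen, hrowlen, hcell⟩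
        by_cases h2 : j + 1 < ((arr.headD []).length : Int)
        · obtain ⟨h2v, h2I⟩ := ih (i + 1) (j + 1) (solveA arr (i + 1) j dp').2 (by omega)
            (by omega) hi1 (by omega) h2 h1I
          by_cases h3 : j - 1 ≥ 0
          · obtain ⟨h3v, h3I⟩ := ih (i + 1) (j - 1)
              (solveA arr (i + 1) (j + 1) (solveA arr (i + 1) j dp').2).2 (by omega)
              (by omega) hi1 (by omega) (by omega) h2I
            simp only [if_pos h2, if_pos h3]
            have hR : max (max (pvGet2 arr i j + (solveA arr (i + 1) j dp').1)
                (pvGet2 arr i j + (solveA arr (i + 1) (j + 1) (solveA arr (i + 1) j dp').2).1))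
                (pvGet2 arr i j + (solveA arr (i + 1) (j - 1)
                  (solveA arr (i + 1) (j + 1) (solveA arr (i + 1) j dp').2).2).1) =
                max (max (pvGet2 arr i j + fval arr dp (i + 1) j)
                  (pvGet2 arr i j + fval arr dp (i + 1) (j + 1)))
                  (pvGet2 arr i j + fval arr dp (i + 1) (j - 1)) := by
              rw [h1v, h2v, h3v]
            have hfv : fval arr dp i j =
                max (max (pvGet2 arr i j + fval arr dp (i + 1) j)
                  (pvGet2 arr i j + fval arr dp (i + 1) (j + 1)))
                  (pvGet2 arr i j + fval arr dp (i + 1) (j - 1)) := by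
              conv_lhs => rw [fval]
              rw [if_neg hbase, if_neg (by simp [hdpmem']), dif_pos hi1]
              simp only [if_pos h2, if_pos h3]
            exact ⟨hR.trans hfv.symm, pvInv_set arr dp _ hdplen hdprow i j hi0 hilt hj0 hjlt
              h3I hdpmem _ (hR.trans hfv.symm)⟩
          · simp only [if_pos h2, if_neg h3]
            have hR : max (max (pvGet2 arr i j + (solveA arr (i + 1) j dp').1)
                (pvGet2 arr i j + (solveA arr (i + 1) (j + 1) (solveA arr (i + 1) j dp').2).1))
                (-999999999) =
                max (max (pvGet2 arr i j + fval arr dp (i + 1) j)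
                  (pvGet2 arr i j + fval arr dp (i + 1) (j + 1))) (-999999999) := by
              rw [h1v, h2v]
            have hfv : fval arr dp i j =
                max (max (pvGet2 arr i j + fval arr dp (i + 1) j)
                  (pvGet2 arr i j + fval arr dp (i + 1) (j + 1))) (-999999999) := by
              conv_lhs => rw [fval]
              rw [if_neg hbase, if_neg (by simp [hdpmem']), dif_pos hi1]
              simp only [if_pos h2, if_neg h3]
            exact ⟨hR.trans hfv.symm, pvInv_set arr dp _ hdplen hdprow i j hi0 hilt hj0 hjlt
              h2I hdpmem _ (hR.trans hfv.symm)⟩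
        · by_cases h3 : j - 1 ≥ 0
          · obtain ⟨h3v, h3I⟩ := ih (i + 1) (j - 1) (solveA arr (i + 1) j dp').2 (by omega)
              (by omega) hi1 (by omega) (by omega) h1I
            simp only [if_neg h2, if_pos h3]
            have hR : max (max (pvGet2 arr i j + (solveA arr (i + 1) j dp').1)
                (-999999999))
                (pvGet2 arr i j + (solveA arr (i + 1) (j - 1) (solveA arr (i + 1) j dp').2).1) =
                max (max (pvGet2 arr i j + fval arr dp (i + 1) j) (-999999999))
                  (pvGet2 arr i j + fval arr dp (i + 1) (j - 1)) := by
              rw [h1v, h3v]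
            have hfv : fval arr dp i j =
                max (max (pvGet2 arr i j + fval arr dp (i + 1) j) (-999999999))
                  (pvGet2 arr i j + fval arr dp (i + 1) (j - 1)) := by
              conv_lhs => rw [fval]
              rw [if_neg hbase, if_neg (by simp [hdpmem']), dif_pos hi1]
              simp only [if_neg h2, if_pos h3]
            exact ⟨hR.trans hfv.symm, pvInv_set arr dp _ hdplen hdprow i j hi0 hilt hj0 hjlt
              h3I hdpmem _ (hR.trans hfv.symm)⟩
          · simp only [if_neg h2, if_neg h3]
            have hR : max (max (pvGet2 arr i j + (solveA arr (i + 1) j dp').1)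
                (-999999999)) (-999999999) =
                max (max (pvGet2 arr i j + fval arr dp (i + 1) j) (-999999999))
                  (-999999999) := by
              rw [h1v]
            have hfv : fval arr dp i j =
                max (max (pvGet2 arr i j + fval arr dp (i + 1) j) (-999999999))
                  (-999999999) := by
              conv_lhs => rw [fval]
              rw [if_neg hbase, if_neg (by simp [hdpmem']), dif_pos hi1]
              simp only [if_neg h2, if_neg h3]
            exact ⟨hR.trans hfv.symm, pvInv_set arr dp _ hdplen hdprow i j hi0 hilt hj0 hjlt
              h1I hdpmem _ (hR.trans hfv.symm)⟩

def rowAt (arr dp : List (List Int)) (r : Int) : List Int :=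
  (PySem.List.pyRange 0 ((arr.headD []).length : Int) 1).map (fun c => fval arr dp r c)

theorem stepB (arr dp : List (List Int)) (r : Int)
    (_h0 : 0 ≤ r) (hlt : r < (arr.length : Int) - 1) :
    ((PySem.List.pyRange 0 ((arr.headD []).length : Int) 1).map (fun c =>
        let dv := pvGet2 dp r c
        if dv ≠ -1 then dv
        else
          let a := pvGet2 arr r c
          let m1 := a + PySem.List.pyGetD (rowAt arr dp (r + 1)) c 0
          let m2 := if c + 1 < ((arr.headD []).length : Int) then
                      a + PySem.List.pyGetD (rowAt arr dp (r + 1)) (c + 1) 0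
                    else (-999999999 : Int)
          let m3 := if c ≥ 1 then a + PySem.List.pyGetD (rowAt arr dp (r + 1)) (c - 1) 0
                    else (-999999999 : Int)
          max (max m1 m2) m3)) = rowAt arr dp r := by
  unfold rowAt
  apply List.map_congr_left
  intro c hc
  obtain ⟨hc0, hcn⟩ := PySem.List.mem_pyRange_one.mp hc
  rw [fval]
  rw [if_neg (show ¬ r = (arr.length : Int) - 1 by omega)]
  dsimp only
  by_cases hdv : pvGet2 dp r c ≠ -1
  · simp only [if_pos hdv]
  · simp only [if_neg hdv, dif_pos (show r + 1 < (arr.length : Int) by omega)]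
    rw [PySem.List.pyGetD_map_pyRange_of_nonneg _ _ _ _ hc0 hcn]
    by_cases h2 : c + 1 < ((arr.headD []).length : Int)
    · rw [if_pos h2, if_pos h2,
        PySem.List.pyGetD_map_pyRange_of_nonneg _ _ _ _ (by omega) h2]
      by_cases h3 : 1 ≤ c
      · rw [if_pos h3, if_pos (show c - 1 ≥ 0 by omega),
          PySem.List.pyGetD_map_pyRange_of_nonneg _ _ _ _ (by omega) (by omega)]
      · rw [if_neg h3, if_neg (show ¬ c - 1 ≥ 0 by omega)]
    · rw [if_neg h2, if_neg h2]
      by_cases h3 : 1 ≤ c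
      · rw [if_pos h3, if_pos (show c - 1 ≥ 0 by omega),
          PySem.List.pyGetD_map_pyRange_of_nonneg _ _ _ _ (by omega) (by omega)]
      · rw [if_neg h3, if_neg (show ¬ c - 1 ≥ 0 by omega)]

theorem foldB (arr dp : List (List Int)) (i : Int) (hi0 : 0 ≤ i) :
    ∀ (m : Nat) (r : Int), (r - (i - 1)).toNat ≤ m → i - 1 ≤ r → r ≤ (arr.length : Int) - 2 →
      ((PySem.List.pyRange r (i - 1) (-1)).foldl (fun below r =>
        (PySem.List.pyRange 0 ((arr.headD []).length : Int) 1).map (fun c =>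
          let dv := pvGet2 dp r c
          if dv ≠ -1 then dv
          else
            let a := pvGet2 arr r c
            let m1 := a + PySem.List.pyGetD below c 0
            let m2 := if c + 1 < ((arr.headD []).length : Int) then
                        a + PySem.List.pyGetD below (c + 1) 0
                      else (-999999999 : Int)
            let m3 := if c ≥ 1 then a + PySem.List.pyGetD below (c - 1) 0
                      else (-999999999 : Int)
            max (max m1 m2) m3)) (rowAt arr dp (r + 1))) = rowAt arr dp i := by
  intro m
  induction m with
  | zero =>
    intro r hm hlo hhi
    have hr : r = i - 1 := by omega
    subst hr
    rw [PySem.List.pyRange_neg_one_eq_nil le_rfl, List.foldl_nil,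
      show i - 1 + 1 = i by ring]
  | succ m ih =>
    intro r hm hlo hhi
    by_cases hr : r = i - 1
    · subst hr
      rw [PySem.List.pyRange_neg_one_eq_nil le_rfl, List.foldl_nil,
        show i - 1 + 1 = i by ring]
    · rw [PySem.List.pyRange_neg_one_cons (show i - 1 < r by omega), List.foldl_cons,
        stepB arr dp r (by omega) (by omega)]
      have h := ih (r - 1) (by omega) (by omega) (by omega)
      rw [show r - 1 + 1 = r by ring] at h
      exact h

theorem solve_alt_eq (arr dp : List (List Int))
    (hrect : ∀ r ∈ arr, r.length = (arr.headD []).length)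
    (i j : Int) (hi0 : 0 ≤ i) (hilt : i < (arr.length : Int))
    (hj0 : 0 ≤ j) (hjlt : j < ((arr.headD []).length : Int)) :
    solve_alt arr i j dp = fval arr dp i j := by
  have hlen1 : 1 ≤ arr.length := by omega
  by_cases hbase : i = (arr.length : Int) - 1
  · unfold solve_alt
    dsimp only
    rw [if_pos hbase, fval, if_pos hbase]
  · unfold solve_alt
    dsimp only
    rw [if_neg hbase]
    by_cases hm : pvGet2 dp i j ≠ -1
    · rw [if_pos hm, fval, if_neg hbase, if_pos hm]
    · rw [if_neg hm]
      rw [not_not] at hm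
      have hl0 : 0 ≤ (arr.length : Int) - 1 := by omega
      have htn : ((arr.length : Int) - 1).toNat = arr.length - 1 := by omega
      have hltN : arr.length - 1 < arr.length := by omega
      have hinit : (PySem.List.pyGet? arr ((arr.length : Int) - 1)).getD [] =
          rowAt arr dp ((arr.length : Int) - 1) := by
        rw [PySem.List.pyGet?_of_nonneg _ hl0, htn, List.getElem?_eq_getElem hltN]
        simp only [Option.getD_some]
        apply List.ext_getElem
        · unfold rowAt
          rw [List.length_map, PySem.List.length_pyRange_one,
            hrect _ (List.getElem_mem hltN)]
          omega
        · intro k h1 h2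
          unfold rowAt
          rw [List.getElem_map, PySem.List.getElem_pyRange_one, fval, if_pos rfl,
            pvGet2_nonneg _ _ _ hl0 (by omega), htn]
          rw [show ((0 : Int) + (k : Int)).toNat = k by omega,
            List.getD_eq_getElem _ _ hltN, List.getD_eq_getElem _ _ h1]
      rw [hinit, show (arr.length : Int) - 1 - 1 = (arr.length : Int) - 2 by ring]
      have hfold := foldB arr dp i hi0 (((arr.length : Int) - 2) - (i - 1)).toNat
        ((arr.length : Int) - 2) le_rfl (by omega) le_rfl
      rw [show (arr.length : Int) - 2 + 1 = (arr.length : Int) - 1 by ring] at hfold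
      rw [hfold]
      exact PySem.List.pyGetD_map_pyRange_of_nonneg _ _ _ _ hj0 hjlt

-- ===== VERDICT (by name: the statement is the Claim_ definition above) =====
theorem solve_spec : Claim_equal_solve := by
  intro arr i j dp _ hpre
  unfold Spec_solve
  rcases hpre with ⟨_, hb, _⟩ | ⟨hnb, hmv⟩ | ⟨hrect, hdplen, hdprow, hi0, hilt, hj0, hjlt⟩
  · unfold solve solve_alt
    rw [solveA, if_pos hb]
    dsimp only
    rw [if_pos hb]
  · have hm : pvGet2 dp i j ≠ -1 := by
      unfold pvGet2
      rcases hopt : (PySem.List.pyGet? dp i).bind (fun r => PySem.List.pyGet? r j) with _ | v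
      · rw [hopt] at hmv; simp at hmv
      · rw [hopt] at hmv; simpa using hmv
    unfold solve solve_alt
    rw [solveA, if_neg hnb, if_pos hm]
    dsimp only
    rw [if_neg hnb, if_pos hm]
  · have hA := (solveA_eq arr dp hdplen hdprow ((arr.length : Int) - i).toNat i j dp le_rfl
        hi0 hilt hj0 hjlt ⟨rfl, fun _ => rfl, fun _ _ _ _ => Or.inl rfl⟩).1
    unfold solve
    rw [hA, solve_alt_eq arr dp hrect i j hi0 hilt hj0 hjlt]
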